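-- pv_equiv track=rewrite | github.com/jeckdm/lbf-tirocinio | local_exec/classificatori.py | cutoff
-- ===== SOURCE A (Python) =====
-- def cutoff(X, y, length):
--     for i,x in enumerate(X):
--         X[i] = x[:min(len(x), length)]
--     pX = []
--     py = []
--     x_prev = ""
--     xy =  [(x, y1) for x, y1 in zip(X, y)]
--     for x,y in sorted(xy, key=lambda x:x[0]):    #ciclo per eliminare elementi doppi (X) e relative y dopo il cutoff
--         if(x != x_prev):
--             pX.append(x)
--             py.append(y)
--         x_prev = x
--     return pX, py
-- ===== SOURCE B (Python) =====
-- def cutoff(X, y, length):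
--     # Truncate in place (as A does), then dedup via a first-occurrence dict and
--     # sort only the distinct keys. Strings truncated to nothing are dropped
--     # (A does the same through its "" sentinel; here it is explicit).
--     for i, x in enumerate(X):
--         X[i] = x[:min(len(x), length)]
--     first = {}
--     for x, y1 in zip(X, y):
--         if x and x not in first:
--             first[x] = y1
--     keys = sorted(first)
--     return keys, [first[k] for k in keys]
-- ===== Notes on version B (the rewrite author's own statement) =====
-- stated objective: alternative
-- what changed: A sorts all truncated (string, label) pairs and removes adjacent duplicates with a '' sentinel (which also drops strings truncated to empty); B builds a first-occurrence dict in one pass, drops empty truncations explicitly, and sorts only the distinct keys.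
import Mathlib
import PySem

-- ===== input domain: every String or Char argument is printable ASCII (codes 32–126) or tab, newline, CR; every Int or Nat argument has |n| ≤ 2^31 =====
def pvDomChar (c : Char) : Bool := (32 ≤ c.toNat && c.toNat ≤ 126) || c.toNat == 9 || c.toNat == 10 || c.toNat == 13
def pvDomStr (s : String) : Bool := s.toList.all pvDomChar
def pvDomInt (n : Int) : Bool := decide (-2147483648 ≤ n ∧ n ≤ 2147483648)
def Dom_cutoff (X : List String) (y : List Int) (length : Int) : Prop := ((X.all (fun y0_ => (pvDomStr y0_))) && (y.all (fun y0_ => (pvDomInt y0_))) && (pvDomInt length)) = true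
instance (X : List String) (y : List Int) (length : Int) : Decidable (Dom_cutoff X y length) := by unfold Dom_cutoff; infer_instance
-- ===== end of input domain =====

-- B replaces A's sort-all-pairs-then-adjacent-dedup by a one-pass first-occurrence
-- dict followed by a sort of only the distinct truncated keys (strings truncated to
-- empty are dropped, as A's "" sentinel does). A mutates X in place; the equivalence
-- proved here is about the return value only.

-- ===== PORT A =====
-- A's enumerate loop rewrites every X[i] to x[:min(len(x), length)] — elementwise, i.e. a map
def cutoff (X : List String) (y : List Int) (length : Int) : List String × List Int :=
  let X1 := X.map (fun x => PySem.Str.slice x none (some (min (PySem.Str.len x) length)))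
  let xy := X1.zip y
  let r := (PySem.List.sorted xy (fun p => p.1) false).foldl
    (fun (st : List String × List Int × String) p =>
      if p.1 ≠ st.2.2 then (st.1 ++ [p.1], st.2.1 ++ [p.2], p.1)
      else (st.1, st.2.1, p.1)) ([], [], "")
  (r.1, r.2.1)

-- ===== PORT B =====
def cutoff_alt (X : List String) (y : List Int) (length : Int) : List String × List Int :=
  let X1 := X.map (fun x => PySem.Str.slice x none (some (min (PySem.Str.len x) length)))
  let first := (X1.zip y).foldl
    (fun d p => if p.1 ≠ "" ∧ d.contains p.1 = false then d.insert p.1 p.2 else d)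
    (PySem.Dict.empty : PySem.Dict String Int)
  let keys := PySem.List.sorted first.keys (fun k => k) false
  -- first[k] cannot raise here (every k ∈ keys is a key of first), so the lookup is getD with a dummy default
  (keys, keys.map (fun k => first.getD k 0))

-- ===== PRECONDITION & SPEC =====
def Spec_cutoff (X : List String) (y : List Int) (length : Int) (out : List String × List Int) : Prop := out = cutoff_alt X y length
instance (X : List String) (y : List Int) (length : Int) (out : List String × List Int) : Decidable (Spec_cutoff X y length out) := by unfold Spec_cutoff; infer_instance

-- ===== CLAIM (what is proved, stated in full; the proofs are below) =====
def Claim_equal_cutoff : Prop := ∀ (X : List String) (y : List Int) (length : Int), Dom_cutoff X y length → Spec_cutoff X y length (cutoff X y length)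

-- ===== LEMMAS AND PROOFS =====

-- the pairs A's dedup scan keeps, as a structural recursion (p = previous key)
def pvSel (p : String) : List (String × Int) → List (String × Int)
  | [] => []
  | q :: t => if q.1 = p then pvSel p t else q :: pvSel q.1 t

-- the final previous key of A's scan
def pvLast (p : String) : List (String × Int) → String
  | [] => p
  | q :: t => pvLast q.1 t

-- the items B's dict ends up with: first occurrences with nonempty, unseen key
def pvFo (seen : List String) : List (String × Int) → List (String × Int)
  | [] => []
  | q :: t => if q.1 = "" ∨ q.1 ∈ seen then pvFo seen t else q :: pvFo (q.1 :: seen) t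

-- "" is the least string
theorem pv_empty_le (s : String) : "" ≤ s := by
  by_contra h
  push Not at h
  rw [String.lt_iff_toList_lt] at h
  simp at h

-- A's foldl in terms of pvSel
theorem pv_foldlA (s : List (String × Int)) : ∀ (a : List String) (b : List Int) (p : String),
    s.foldl (fun (st : List String × List Int × String) q =>
      if q.1 ≠ st.2.2 then (st.1 ++ [q.1], st.2.1 ++ [q.2], q.1)
      else (st.1, st.2.1, q.1)) (a, b, p)
    = (a ++ (pvSel p s).map (·.1), b ++ (pvSel p s).map (·.2), pvLast p s) := by
  induction s with
  | nil => intro a b p; simp [pvSel, pvLast]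
  | cons q t ih =>
    intro a b p
    rw [List.foldl_cons]
    by_cases h : q.1 = p
    · have hstep : (if q.1 ≠ (a, b, p).2.2 then (a ++ [q.1], b ++ [q.2], q.1) else (a, b, q.1)) = (a, b, q.1) := by
        simp [h]
      rw [hstep, ih]
      simp [pvSel, pvLast, h]
    · have hstep : (if q.1 ≠ (a, b, p).2.2 then (a ++ [q.1], b ++ [q.2], q.1) else (a, b, q.1)) = (a ++ [q.1], b ++ [q.2], q.1) := by
        simp [h]
      rw [hstep, ih]
      simp [pvSel, pvLast, h]

-- pvFo only looks at seen through membership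
theorem pv_fo_congr (xs : List (String × Int)) : ∀ (s₁ s₂ : List String),
    (∀ k, k ∈ s₁ ↔ k ∈ s₂) → pvFo s₁ xs = pvFo s₂ xs := by
  induction xs with
  | nil => intro _ _ _; rfl
  | cons q t ih =>
    intro s₁ s₂ h
    by_cases h1 : q.1 = "" ∨ q.1 ∈ s₁
    · have h2 : q.1 = "" ∨ q.1 ∈ s₂ := by
        rcases h1 with h1 | h1
        · exact Or.inl h1
        · exact Or.inr ((h q.1).1 h1)
      simp [pvFo, h1, h2, ih _ _ h]
    · have h2 : ¬ (q.1 = "" ∨ q.1 ∈ s₂) := by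
        intro h2
        rcases h2 with h2 | h2
        · exact h1 (Or.inl h2)
        · exact h1 (Or.inr ((h q.1).2 h2))
      have hc : ∀ k, k ∈ q.1 :: s₁ ↔ k ∈ q.1 :: s₂ := by intro k; simp [h k]
      simp [pvFo, h1, h2, ih _ _ hc]

-- B's foldl in terms of pvFo
theorem pv_foldlB (xs : List (String × Int)) : ∀ (d : PySem.Dict String Int),
    (xs.foldl (fun d p => if p.1 ≠ "" ∧ d.contains p.1 = false then d.insert p.1 p.2 else d) d).items
    = d.items ++ pvFo d.keys xs := by
  induction xs with
  | nil => intro d; simp [pvFo]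
  | cons q t ih =>
    intro d
    rw [List.foldl_cons]
    by_cases h1 : q.1 = "" ∨ q.1 ∈ d.keys
    · have hc : ¬ (q.1 ≠ "" ∧ d.contains q.1 = false) := by
        rcases h1 with h1 | h1
        · simp [h1]
        · simp [(PySem.Dict.contains_iff_mem_keys d q.1).2 h1]
      rw [if_neg hc, ih]
      simp [pvFo, h1]
    · push Not at h1
      have hc : d.contains q.1 = false := by
        rcases hcc : d.contains q.1 with _ | _
        · rfl
        · exact absurd ((PySem.Dict.contains_iff_mem_keys d q.1).1 hcc) h1.2
      rw [if_pos ⟨h1.1, hc⟩, ih]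
      rw [PySem.Dict.items_insert_of_not_contains d q.2 hc,
          PySem.Dict.keys_insert_of_not_contains d q.2 hc]
      have hcg : pvFo (d.keys ++ [q.1]) t = pvFo (q.1 :: d.keys) t :=
        pv_fo_congr t _ _ (by intro k; simp; tauto)
      rw [hcg]
      simp [pvFo, h1.1, h1.2]

-- keys of pvFo: membership
theorem pv_fo_mem (xs : List (String × Int)) : ∀ (seen : List String) (k : String),
    k ∉ seen → (k ∈ (pvFo seen xs).map (·.1) ↔ (k ≠ "" ∧ k ∈ xs.map (·.1))) := by
  induction xs with
  | nil => intro seen k _; simp [pvFo]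
  | cons q t ih =>
    intro seen k hk
    by_cases h1 : q.1 = "" ∨ q.1 ∈ seen
    · rw [show pvFo seen (q :: t) = pvFo seen t by simp [pvFo, h1], ih seen k hk]
      constructor
      · rintro ⟨h2, h3⟩; exact ⟨h2, by simp; right; simpa using h3⟩
      · rintro ⟨h2, h3⟩
        refine ⟨h2, ?_⟩
        simp at h3 ⊢
        rcases h3 with h3 | h3
        · rcases h1 with h1 | h1
          · exact absurd (h3 ▸ h1) h2
          · exact absurd (h3 ▸ h1) hk
        · exact h3
    · rw [show pvFo seen (q :: t) = q :: pvFo (q.1 :: seen) t by simp [pvFo, h1]]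
      push Not at h1
      by_cases hkq : k = q.1
      · subst hkq
        simp [h1.1]
      · have hk' : k ∉ q.1 :: seen := by simp [hkq, hk]
        rw [List.map_cons, List.mem_cons]
        rw [ih (q.1 :: seen) k hk']
        constructor
        · rintro (h2 | ⟨h2, h3⟩)
          · exact absurd h2 hkq
          · exact ⟨h2, by simp; right; simpa using h3⟩
        · rintro ⟨h2, h3⟩
          right
          refine ⟨h2, ?_⟩
          simp at h3 ⊢
          rcases h3 with h3 | h3
          · exact absurd h3 hkq
          · exact h3

-- keys of pvFo: nodup and fresh w.r.t. seen
theorem pv_fo_nodup (xs : List (String × Int)) : ∀ (seen : List String),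
    ((pvFo seen xs).map (·.1)).Nodup ∧ ∀ k ∈ (pvFo seen xs).map (·.1), k ∉ seen := by
  induction xs with
  | nil => intro seen; simp [pvFo]
  | cons q t ih =>
    intro seen
    by_cases h1 : q.1 = "" ∨ q.1 ∈ seen
    · rw [show pvFo seen (q :: t) = pvFo seen t by simp [pvFo, h1]]
      exact ih seen
    · rw [show pvFo seen (q :: t) = q :: pvFo (q.1 :: seen) t by simp [pvFo, h1]]
      obtain ⟨hnd, hfresh⟩ := ih (q.1 :: seen)
      refine ⟨?_, ?_⟩
      · rw [List.map_cons, List.nodup_cons]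
        exact ⟨fun hmem => (hfresh _ hmem) (by simp), hnd⟩
      · intro k hkmem
        rw [List.map_cons, List.mem_cons] at hkmem
        rcases hkmem with h2 | h2
        · push Not at h1; exact h2 ▸ h1.2
        · intro hks; exact (hfresh k h2) (by simp [hks])

-- appending one pair to pvFo's input
theorem pv_fo_append (xs : List (String × Int)) (a : String × Int) : ∀ (seen : List String),
    pvFo seen (xs ++ [a]) =
      pvFo seen xs ++ (if a.1 = "" ∨ a.1 ∈ seen ∨ a.1 ∈ (pvFo seen xs).map (·.1) then [] else [a]) := by
  induction xs with
  | nil =>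
    intro seen
    by_cases h : a.1 = "" ∨ a.1 ∈ seen
    · simp [pvFo, h]
    · push Not at h
      simp [pvFo, h.1, h.2]
  | cons q t ih =>
    intro seen
    by_cases h1 : q.1 = "" ∨ q.1 ∈ seen
    · rw [show (q :: t) ++ [a] = q :: (t ++ [a]) by simp,
          show pvFo seen (q :: (t ++ [a])) = pvFo seen (t ++ [a]) by simp [pvFo, h1],
          show pvFo seen (q :: t) = pvFo seen t by simp [pvFo, h1], ih seen]
    · rw [show (q :: t) ++ [a] = q :: (t ++ [a]) by simp,
          show pvFo seen (q :: (t ++ [a])) = q :: pvFo (q.1 :: seen) (t ++ [a]) by simp [pvFo, h1],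
          show pvFo seen (q :: t) = q :: pvFo (q.1 :: seen) t by simp [pvFo, h1],
          ih (q.1 :: seen)]
      have hcond : (a.1 = "" ∨ a.1 ∈ q.1 :: seen ∨ a.1 ∈ (pvFo (q.1 :: seen) t).map (·.1))
          ↔ (a.1 = "" ∨ a.1 ∈ seen ∨ a.1 ∈ ((q :: pvFo (q.1 :: seen) t).map (·.1))) := by
        simp; tauto
      by_cases h2 : a.1 = "" ∨ a.1 ∈ q.1 :: seen ∨ a.1 ∈ (pvFo (q.1 :: seen) t).map (·.1)
      · rw [if_pos h2, if_pos (hcond.1 h2)]; simp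
      · rw [if_neg h2, if_neg (fun hx => h2 (hcond.2 hx))]; simp

-- pvSel through insertBy into a key-sorted list
theorem pv_sel_insertBy (a : String × Int) :
    ∀ (s : List (String × Int)), s.Pairwise (fun u v => u.1 ≤ v.1) →
    ∀ (p : String), (∀ q ∈ s, p ≤ q.1) → p ≤ a.1 →
    pvSel p (PySem.List.insertBy (fun u v : String × Int => decide (u.1 < v.1)) a s)
    = if a.1 = p ∨ a.1 ∈ s.map (·.1) then pvSel p s
      else PySem.List.insertBy (fun u v : String × Int => decide (u.1 < v.1)) a (pvSel p s) := by
  intro s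
  induction s with
  | nil =>
    intro _ p _ _
    by_cases hap : a.1 = p <;> simp [PySem.List.insertBy, pvSel, hap]
  | cons q t ih =>
    intro hs p hp hpa
    have hq : ∀ r ∈ t, q.1 ≤ r.1 := fun r hr => (List.pairwise_cons.1 hs).1 r hr
    have ht : t.Pairwise (fun u v => u.1 ≤ v.1) := (List.pairwise_cons.1 hs).2
    by_cases hb : a.1 < q.1
    · rw [show PySem.List.insertBy (fun u v : String × Int => decide (u.1 < v.1)) a (q :: t)
          = a :: q :: t by simp [PySem.List.insertBy, hb]]
      by_cases hap : a.1 = p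
      · rw [if_pos (Or.inl hap)]
        simp [pvSel, hap]
      · have hpa' : p < a.1 := lt_of_le_of_ne hpa (fun h => hap h.symm)
        have hqp : q.1 ≠ p := Ne.symm (ne_of_lt (lt_trans hpa' hb))
        have hmem : a.1 ∉ (q :: t).map (·.1) := by
          simp only [List.map_cons, List.mem_cons, List.mem_map]
          rintro (h | ⟨r, hr, hre⟩)
          · exact absurd h (ne_of_lt hb)
          · exact absurd hre (Ne.symm (ne_of_lt (lt_of_lt_of_le hb (hq r hr))))
        rw [if_neg (by rintro (h | h); exact hap h; exact hmem h)]
        rw [show pvSel p (a :: q :: t) = a :: pvSel a.1 (q :: t) by simp [pvSel, hap]]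
        rw [show pvSel a.1 (q :: t) = q :: pvSel q.1 t by simp [pvSel, Ne.symm (ne_of_lt hb)]]
        rw [show pvSel p (q :: t) = q :: pvSel q.1 t by simp [pvSel, hqp]]
        simp [PySem.List.insertBy, hb]
    · have hqa : q.1 ≤ a.1 := le_of_not_gt hb
      rw [show PySem.List.insertBy (fun u v : String × Int => decide (u.1 < v.1)) a (q :: t)
          = q :: PySem.List.insertBy (fun u v : String × Int => decide (u.1 < v.1)) a t by
            simp [PySem.List.insertBy, hb]]
      by_cases hqp : q.1 = p
      · rw [show pvSel p (q :: PySem.List.insertBy (fun u v : String × Int => decide (u.1 < v.1)) a t)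
            = pvSel p (PySem.List.insertBy (fun u v : String × Int => decide (u.1 < v.1)) a t) by
              simp [pvSel, hqp]]
        rw [ih ht p (fun r hr => hqp ▸ hq r hr) hpa]
        rw [show pvSel p (q :: t) = pvSel p t by simp [pvSel, hqp]]
        have hcond : (a.1 = p ∨ a.1 ∈ t.map (·.1)) ↔ (a.1 = p ∨ a.1 ∈ (q :: t).map (·.1)) := by
          subst hqp; simp
        by_cases h2 : a.1 = p ∨ a.1 ∈ t.map (·.1)
        · rw [if_pos h2, if_pos (hcond.1 h2)]
        · rw [if_neg h2, if_neg (fun hx => h2 (hcond.2 hx))]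
      · rw [show pvSel p (q :: PySem.List.insertBy (fun u v : String × Int => decide (u.1 < v.1)) a t)
            = q :: pvSel q.1 (PySem.List.insertBy (fun u v : String × Int => decide (u.1 < v.1)) a t) by
              simp [pvSel, hqp]]
        rw [ih ht q.1 hq hqa]
        have hap : a.1 ≠ p := fun h => hqp (le_antisymm (h ▸ hqa) (hp q (List.mem_cons_self)))
        rw [show pvSel p (q :: t) = q :: pvSel q.1 t by simp [pvSel, hqp]]
        by_cases h2 : a.1 = q.1 ∨ a.1 ∈ t.map (·.1)
        · rw [if_pos ?side1, if_pos ?side2]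
          case side1 => tauto
          case side2 => simp only [List.map_cons, List.mem_cons]; tauto
        · rw [if_neg ?side3, if_neg ?side4]
          case side3 => tauto
          case side4 => simp only [List.map_cons, List.mem_cons]; tauto
          simp [PySem.List.insertBy, hb]

-- sorted of xs ++ [a] is insertBy into sorted xs
theorem pv_sorted_append (xs : List (String × Int)) (a : String × Int) :
    PySem.List.sorted (xs ++ [a]) (fun p => p.1) false
    = PySem.List.insertBy (fun u v : String × Int => decide (u.1 < v.1)) a
        (PySem.List.sorted xs (fun p => p.1) false) := by
  rw [PySem.List.sorted_eq_foldl_insertBy, PySem.List.sorted_eq_foldl_insertBy, List.foldl_append]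
  rfl

-- MAIN: A's dedup of the sorted pairs = sort of B's first-occurrence items
theorem pv_main (xs : List (String × Int)) :
    pvSel "" (PySem.List.sorted xs (fun p => p.1) false)
    = PySem.List.sorted (pvFo [] xs) (fun p => p.1) false := by
  induction xs using List.reverseRecOn with
  | nil => simp [PySem.List.sorted, pvSel, pvFo]
  | append_singleton xs a ih =>
    rw [pv_sorted_append]
    have hs : (PySem.List.sorted xs (fun p : String × Int => p.1) false).Pairwise
        (fun u v => u.1 ≤ v.1) := PySem.List.sorted_pairwise xs (fun p => p.1)
    rw [pv_sel_insertBy a _ hs "" (fun q _ => pv_empty_le q.1) (pv_empty_le a.1)]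
    have hmm : a.1 ∈ (PySem.List.sorted xs (fun p : String × Int => p.1) false).map (·.1)
        ↔ a.1 ∈ xs.map (·.1) := by
      simp only [List.mem_map]
      constructor
      · rintro ⟨r, hr, hre⟩; exact ⟨r, (PySem.List.mem_sorted xs _ false r).1 hr, hre⟩
      · rintro ⟨r, hr, hre⟩; exact ⟨r, (PySem.List.mem_sorted xs _ false r).2 hr, hre⟩
    by_cases hcond : a.1 = "" ∨ a.1 ∈ xs.map (·.1)
    · rw [if_pos (by rcases hcond with h | h; exact Or.inl h; exact Or.inr (hmm.2 h)), ih,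
          pv_fo_append]
      have hfo : a.1 = "" ∨ a.1 ∈ ([] : List String) ∨ a.1 ∈ (pvFo [] xs).map (·.1) := by
        rcases hcond with h | h
        · exact Or.inl h
        · by_cases he : a.1 = ""
          · exact Or.inl he
          · exact Or.inr (Or.inr ((pv_fo_mem xs [] a.1 (by simp)).2 ⟨he, h⟩))
      rw [if_pos hfo]
      simp
    · push Not at hcond
      rw [if_neg (by rintro (h | h); exact hcond.1 h; exact hcond.2 (hmm.1 h)), ih,
          pv_fo_append]
      have hnotin : a.1 ∉ (pvFo [] xs).map (·.1) :=
        fun h => hcond.2 (((pv_fo_mem xs [] a.1 (by simp)).1 h).2)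
      rw [if_neg (by simp [hcond.1, hnotin]), pv_sorted_append]

-- ===== VERDICT (by name: the statement is the Claim_ definition above) =====
theorem cutoff_spec : Claim_equal_cutoff := by
  intro X y length _
  show cutoff X y length = cutoff_alt X y length
  simp only [cutoff, cutoff_alt]
  set xs := (X.map (fun x => PySem.Str.slice x none (some (min (PySem.Str.len x) length)))).zip y with hxs
  -- A's side
  rw [pv_foldlA]
  -- B's side: the dict's items are pvFo [] xs
  have hB : ((xs.foldl
      (fun d p => if p.1 ≠ "" ∧ d.contains p.1 = false then d.insert p.1 p.2 else d)
      (PySem.Dict.empty : PySem.Dict String Int)))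
      = PySem.Dict.mk (pvFo [] xs) := by
    apply PySem.Dict.ext
    rw [pv_foldlB]
    rfl
  rw [hB]
  set zs := pvFo [] xs with hzs
  set w := PySem.List.sorted zs (fun p => p.1) false with hw
  have hnd : (zs.map (·.1)).Nodup := (pv_fo_nodup xs []).1
  have hperm : (w.map (·.1)).Perm (zs.map (·.1)) :=
    (PySem.List.sorted_perm zs (fun p => p.1) false).map (·.1)
  have hkeys : (PySem.Dict.mk zs).keys = zs.map (·.1) := rfl
  -- the sorted distinct keys are the keys of the sorted items
  have hE1 : PySem.List.sorted (zs.map (·.1)) (fun k => k) false = w.map (·.1) := by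
    apply PySem.List.sorted_eq_of_perm_of_pairwise_lt _ _ _ hperm
    have hle : (w.map (·.1)).Pairwise (fun u v => u ≤ v) :=
      PySem.List.sorted_map_key_pairwise zs (fun p => p.1)
    have hne : (w.map (·.1)).Nodup := hperm.nodup_iff.mpr hnd
    exact (hle.and hne).imp (fun h => lt_of_le_of_ne h.1 h.2)
  -- looking the sorted keys up in the dict recovers the paired values
  have hE2 : (w.map (·.1)).map (fun k => (PySem.Dict.mk zs).getD k 0) = w.map (·.2) := by
    rw [List.map_map]
    apply List.map_congr_left
    intro p hp
    have hpz : p ∈ zs := (PySem.List.mem_sorted zs (fun p => p.1) false p).1 hp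
    exact PySem.Dict.getD_of_mem_items (PySem.Dict.mk zs) (by exact hpz) (hkeys ▸ hnd) 0
  rw [hkeys, hE1, hE2]
  rw [pv_main]
  rfl
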